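-- pv_equiv track=rewrite | github.com/MaSiRoProjectOSS/CodeLanguageConverter | converter/converter/cpp_code_converter.py | avoid_unnecessary_comment_before_class_declaration
-- ===== SOURCE A (Python) =====
-- def avoid_unnecessary_comment_before_class_declaration(original_code: str):
--     code_lines = original_code.split("\n")
--     output_text = ""
--     class_started = False
--     for i, line in enumerate(code_lines):
--         if line.startswith("class "):
--             class_started = True
--             output_text += line + "\n"
--         else:
--             if True == class_started:
--                 output_text += line + "\n"
--
--     return output_text
-- ===== SOURCE B (Python) =====
-- def avoid_unnecessary_comment_before_class_declaration(original_code: str):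
--     lines = original_code.split("\n")
--     for i, line in enumerate(lines):
--         if line.startswith("class "):
--             return "".join(l + "\n" for l in lines[i:])
--     return ""
-- ===== Notes on version B (the rewrite author's own statement) =====
-- stated objective: simpler
-- what changed: Replaces the per-line flag-accumulator scan with a two-phase find-the-first-class-line-then-emit-the-suffix shape (early return, join of the tail slice).
import Mathlib
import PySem

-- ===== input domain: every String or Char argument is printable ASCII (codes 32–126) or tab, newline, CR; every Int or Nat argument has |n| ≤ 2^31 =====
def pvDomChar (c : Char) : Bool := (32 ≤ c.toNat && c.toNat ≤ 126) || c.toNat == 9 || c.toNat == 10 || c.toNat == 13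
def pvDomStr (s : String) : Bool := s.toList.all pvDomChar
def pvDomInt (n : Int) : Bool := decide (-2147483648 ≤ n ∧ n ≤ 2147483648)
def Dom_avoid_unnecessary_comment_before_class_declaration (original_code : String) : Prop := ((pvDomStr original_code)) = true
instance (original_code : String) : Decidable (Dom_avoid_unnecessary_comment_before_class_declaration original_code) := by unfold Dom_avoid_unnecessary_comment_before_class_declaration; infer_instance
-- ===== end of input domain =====

-- B replaces A's per-line flag-accumulator scan with find-first-class-line-then-emit-suffix (simpler decomposition, same cost).

-- ===== PORT A =====
-- A's loop state: (output_text, class_started); branches in A's order.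
-- split("\n") with a nonempty literal separator always succeeds, so .getD [] is never the default.
def pvAStep (st : String × Bool) (line : String) : String × Bool :=
  if PySem.Str.startswith line "class " then (st.1 ++ line ++ "\n", true)
  else if st.2 then (st.1 ++ line ++ "\n", st.2) else st

def avoid_unnecessary_comment_before_class_declaration (original_code : String) : String :=
  let code_lines := (PySem.Str.split? original_code "\n").getD []
  (code_lines.foldl pvAStep ("", false)).1

-- ===== PORT B =====
-- ''.join(l + "\n" for l in tail) ported as String.join of the mapped tail; early return = recursion stop.
def pvBFind : List String → String
  | [] => ""
  | line :: rest =>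
      if PySem.Str.startswith line "class " then String.join ((line :: rest).map (· ++ "\n"))
      else pvBFind rest

def avoid_unnecessary_comment_before_class_declaration_alt (original_code : String) : String :=
  pvBFind ((PySem.Str.split? original_code "\n").getD [])

-- ===== PRECONDITION & SPEC =====
def Spec_avoid_unnecessary_comment_before_class_declaration (original_code : String) (out : String) : Prop := out = avoid_unnecessary_comment_before_class_declaration_alt original_code
instance (original_code : String) (out : String) : Decidable (Spec_avoid_unnecessary_comment_before_class_declaration original_code out) := by unfold Spec_avoid_unnecessary_comment_before_class_declaration; infer_instance

-- ===== CLAIM (what is proved, stated in full; the proofs are below) =====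
def Claim_equal_avoid_unnecessary_comment_before_class_declaration : Prop := ∀ (original_code : String), Dom_avoid_unnecessary_comment_before_class_declaration original_code → Spec_avoid_unnecessary_comment_before_class_declaration original_code (avoid_unnecessary_comment_before_class_declaration original_code)

-- ===== LEMMAS AND PROOFS =====
theorem pvFoldlAppend : ∀ (l : List String) (acc : String), l.foldl (· ++ ·) acc = acc ++ l.foldl (· ++ ·) "" := by
  intro l
  induction l with
  | nil => intro acc; simp
  | cons x xs ih =>
      intro acc
      rw [List.foldl_cons, ih (acc ++ x), List.foldl_cons, ih ("" ++ x)]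
      simp [String.append_assoc]

theorem pvJoin_cons (a : String) (l : List String) : String.join (a :: l) = a ++ String.join l := by
  simp only [String.join, List.foldl_cons]
  rw [pvFoldlAppend]
  simp

theorem pvFoldTrue (lines : List String) : ∀ acc : String,
    (lines.foldl pvAStep (acc, true)).1 = acc ++ String.join (lines.map (· ++ "\n")) := by
  induction lines with
  | nil => intro acc; simp [String.join]
  | cons l rest ih =>
      intro acc
      have hstep : pvAStep (acc, true) l = (acc ++ l ++ "\n", true) := by
        unfold pvAStep; split <;> rfl
      simp only [List.foldl, hstep, ih, List.map, pvJoin_cons, String.append_assoc]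

theorem pvFoldFalse (lines : List String) : ∀ acc : String,
    (lines.foldl pvAStep (acc, false)).1 = acc ++ pvBFind lines := by
  induction lines with
  | nil => intro acc; simp [pvBFind]
  | cons l rest ih =>
      intro acc
      by_cases h : PySem.Str.startswith l "class " = true
      · simp only [List.foldl, pvAStep, h, if_true, pvBFind, pvFoldTrue, List.map,
          pvJoin_cons, String.append_assoc]
      · simp only [List.foldl, pvAStep, h, if_false, Bool.false_eq_true, pvBFind, ih]

-- ===== VERDICT (by name: the statement is the Claim_ definition above) =====
theorem avoid_unnecessary_comment_before_class_declaration_spec : Claim_equal_avoid_unnecessary_comment_before_class_declaration := by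
  intro s _
  unfold Spec_avoid_unnecessary_comment_before_class_declaration
    avoid_unnecessary_comment_before_class_declaration
    avoid_unnecessary_comment_before_class_declaration_alt
  simp [pvFoldFalse]
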